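-- pv_equiv track=rewrite | github.com/JohnnyBra/sustituciones | sustituciones_app/substitution_logic.py | select_teacher_for_substitution
-- ===== SOURCE A (Python) =====
-- def select_teacher_for_substitution(available_teacher_names, substitution_counts):
--     """
--     Selects a teacher for substitution based on the minimum number of substitutions.
--     This function is now a general helper and can be used by find_available_teachers.
--
--     Args:
--         available_teacher_names (list): A list of names of available teachers for a specific slot/block.
--         substitution_counts (dict): A dict of teacher names and their substitution counts.
--
--     Returns:
--         str: The name of the selected teacher, or None if no teachers are available.
--     """
--     if not available_teacher_names:
--         return None
--
--     min_substitutions = float('inf')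
--     selected_teacher_name = None
--
--     # Ensure consistent selection if counts are equal by sorting teachers by name
--     # This makes testing more predictable.
--     for teacher_name in sorted(available_teacher_names):
--         count = substitution_counts.get(teacher_name, 0)
--         if count < min_substitutions:
--             min_substitutions = count
--             selected_teacher_name = teacher_name
--         # If counts are equal, the first one (due to sorted list) is kept.
--
--     return selected_teacher_name
-- ===== SOURCE B (Python) =====
-- def select_teacher_for_substitution(available_teacher_names, substitution_counts):
--     if not available_teacher_names:
--         return None
--     min_count = min(substitution_counts.get(n, 0) for n in available_teacher_names)
--     return min(n for n in available_teacher_names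
--                if substitution_counts.get(n, 0) == min_count)
-- ===== Notes on version B (the rewrite author's own statement) =====
-- stated objective: simpler
-- what changed: Replaced A's sort-then-scan-with-running-minimum by a sort-free two-pass decomposition: compute the minimum count, then return the lexicographically smallest name among those attaining it.
import Mathlib
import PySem

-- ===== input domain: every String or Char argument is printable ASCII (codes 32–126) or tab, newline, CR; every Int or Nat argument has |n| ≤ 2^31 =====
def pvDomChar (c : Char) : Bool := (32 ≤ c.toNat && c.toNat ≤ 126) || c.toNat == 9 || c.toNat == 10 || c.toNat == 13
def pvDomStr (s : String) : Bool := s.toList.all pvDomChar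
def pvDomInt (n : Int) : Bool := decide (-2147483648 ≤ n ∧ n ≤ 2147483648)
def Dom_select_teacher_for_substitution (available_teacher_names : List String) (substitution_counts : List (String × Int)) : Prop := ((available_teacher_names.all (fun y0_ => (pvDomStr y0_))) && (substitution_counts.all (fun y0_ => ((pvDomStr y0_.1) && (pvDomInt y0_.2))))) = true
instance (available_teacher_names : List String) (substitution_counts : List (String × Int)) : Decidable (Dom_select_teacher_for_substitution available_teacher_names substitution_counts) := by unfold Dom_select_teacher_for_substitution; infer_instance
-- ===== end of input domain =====

-- B replaces A's sort + keep-first-strict-minimum scan by a sort-free two-pass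
-- decomposition (minimum count, then lexicographically smallest name attaining it); objective: simpler.


-- ===== PORT A =====
-- the for-loop of A: state (min_substitutions, selected_teacher_name); none plays float('inf') / None
def pyA_loop (substitution_counts : List (String × Int)) :
    List String → Option Int → Option String → Option Int × Option String
  | [], m, sel => (m, sel)
  | teacher_name :: rest, m, sel =>
    let count := PySem.Dict.getD ⟨substitution_counts⟩ teacher_name 0
    if (match m with | none => true | some mv => decide (count < mv)) = true then
      pyA_loop substitution_counts rest (some count) (some teacher_name)
    else
      pyA_loop substitution_counts rest m sel

def select_teacher_for_substitution (available_teacher_names : List String) (substitution_counts : List (String × Int)) : Option String :=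
  if available_teacher_names = [] then none
  else
    (pyA_loop substitution_counts
      (PySem.List.sorted available_teacher_names (fun x => x) false) none none).2

-- ===== PORT B =====
def select_teacher_for_substitution_alt (available_teacher_names : List String) (substitution_counts : List (String × Int)) : Option String :=
  if available_teacher_names = [] then none
  else
    match PySem.List.min?
        (available_teacher_names.map (fun n => PySem.Dict.getD ⟨substitution_counts⟩ n 0))
        (fun x => x) with
    | none => none
    | some min_count =>
        PySem.List.min?
          (available_teacher_names.filter
            (fun n => PySem.Dict.getD ⟨substitution_counts⟩ n 0 == min_count))
          (fun x => x)

-- ===== PRECONDITION & SPEC =====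
def Spec_select_teacher_for_substitution (available_teacher_names : List String) (substitution_counts : List (String × Int)) (out : Option String) : Prop := out = select_teacher_for_substitution_alt available_teacher_names substitution_counts
instance (available_teacher_names : List String) (substitution_counts : List (String × Int)) (out : Option String) : Decidable (Spec_select_teacher_for_substitution available_teacher_names substitution_counts out) := by unfold Spec_select_teacher_for_substitution; infer_instance

-- ===== CLAIM (what is proved, stated in full; the proofs are below) =====
def Claim_equal_select_teacher_for_substitution : Prop := ∀ (available_teacher_names : List String) (substitution_counts : List (String × Int)), Dom_select_teacher_for_substitution available_teacher_names substitution_counts → Spec_select_teacher_for_substitution available_teacher_names substitution_counts (select_teacher_for_substitution available_teacher_names substitution_counts)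

-- ===== LEMMAS AND PROOFS =====

-- invariant of A's loop once the state is (some m, some x) with g x = m:
-- the result (some m', some x') has g x' = m', m' is the minimum of m and the counts of l,
-- the state is unchanged iff no strict improvement, and x' is ≤ every candidate attaining m'.
theorem pyA_loop_spec (counts : List (String × Int)) (l : List String) (m : Int) (x : String)
    (hx : PySem.Dict.getD ⟨counts⟩ x 0 = m)
    (hxle : ∀ y ∈ l, x ≤ y) (hp : l.Pairwise (· ≤ ·)) :
    ∃ m' x', pyA_loop counts l (some m) (some x) = (some m', some x') ∧
      PySem.Dict.getD ⟨counts⟩ x' 0 = m' ∧ m' ≤ m ∧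
      (∀ y ∈ l, m' ≤ PySem.Dict.getD ⟨counts⟩ y 0) ∧
      (x' = x ∨ x' ∈ l) ∧ (m' = m → x' = x) ∧
      (∀ y, (y = x ∨ y ∈ l) → PySem.Dict.getD ⟨counts⟩ y 0 = m' → x' ≤ y) := by
  induction l generalizing m x with
  | nil =>
      refine ⟨m, x, rfl, hx, le_refl _, by simp, Or.inl rfl, fun _ => rfl, ?_⟩
      rintro y (rfl | hy) _
      · exact le_refl _
      · simp at hy
  | cons y l ih =>
      have hyle : ∀ z ∈ l, y ≤ z := fun z hz => (List.pairwise_cons.mp hp).1 z hz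
      have hp' : l.Pairwise (· ≤ ·) := (List.pairwise_cons.mp hp).2
      by_cases hlt : PySem.Dict.getD ⟨counts⟩ y 0 < m
      · -- strict improvement: state becomes (g y, y)
        obtain ⟨m', x', heq, hgx', hle, hmin, hmem, hsame, hname⟩ :=
          ih (PySem.Dict.getD ⟨counts⟩ y 0) y rfl hyle hp'
        refine ⟨m', x', ?_, hgx', le_of_lt (lt_of_le_of_lt hle hlt), ?_, ?_, ?_, ?_⟩
        · simpa [pyA_loop, hlt] using heq
        · intro z hz
          rcases List.mem_cons.mp hz with rfl | hz'
          · exact hle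
          · exact hmin z hz'
        · rcases hmem with rfl | hmm
          · exact Or.inr List.mem_cons_self
          · exact Or.inr (List.mem_cons_of_mem _ hmm)
        · intro hmeq; exact absurd (hmeq ▸ lt_of_le_of_lt hle hlt) (lt_irrefl _)
        · rintro z (rfl | hz) hgz
          · have h1 := lt_of_le_of_lt hle hlt
            rw [← hgz, hx] at h1
            exact absurd h1 (lt_irrefl _)
          · rcases List.mem_cons.mp hz with rfl | hz'
            · exact hname z (Or.inl rfl) hgz
            · exact hname z (Or.inr hz') hgz
      · -- no improvement: state unchanged
        obtain ⟨m', x', heq, hgx', hle, hmin, hmem, hsame, hname⟩ := ih m x hx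
          (fun z hz => hxle z (List.mem_cons_of_mem _ hz)) hp'
        refine ⟨m', x', ?_, hgx', hle, ?_, ?_, hsame, ?_⟩
        · simpa [pyA_loop, hlt] using heq
        · intro z hz
          rcases List.mem_cons.mp hz with rfl | hz'
          · exact le_trans hle (not_lt.mp hlt)
          · exact hmin z hz'
        · rcases hmem with rfl | hmm
          · exact Or.inl rfl
          · exact Or.inr (List.mem_cons_of_mem _ hmm)
        · rintro z (rfl | hz) hgz
          · exact hname z (Or.inl rfl) hgz
          · rcases List.mem_cons.mp hz with rfl | hz'
            · -- z = y with count m' forces m' = m, so x' = x ≤ y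
              have hm : m' = m := le_antisymm hle (hgz ▸ not_lt.mp hlt)
              rw [hsame hm]
              exact hxle z List.mem_cons_self
            · exact hname z (Or.inr hz') hgz

-- ===== VERDICT (by name: the statement is the Claim_ definition above) =====
theorem select_teacher_for_substitution_spec : Claim_equal_select_teacher_for_substitution := by
  intro names counts _
  unfold Spec_select_teacher_for_substitution
  unfold select_teacher_for_substitution select_teacher_for_substitution_alt
  by_cases hnil : names = []
  · simp [hnil]
  · simp only [if_neg hnil]
    set g : String → Int := fun n => PySem.Dict.getD ⟨counts⟩ n 0 with hg
    -- A side
    obtain ⟨h, t, hs⟩ : ∃ h t, PySem.List.sorted names (fun x => x) false = h :: t := by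
      rcases hsort : PySem.List.sorted names (fun x => x) false with _ | ⟨h, t⟩
      · exact absurd ((PySem.List.sorted_eq_nil_iff names _ false).mp hsort) hnil
      · exact ⟨h, t, rfl⟩
    have hpair : (h :: t).Pairwise (fun a b => a ≤ b) := by
      have := PySem.List.sorted_pairwise names (fun x => x)
      rwa [hs] at this
    obtain ⟨m', x', heq, hgx', hle', hmin, hmem, _, hname⟩ :=
      pyA_loop_spec counts t (g h) h rfl
        (fun z hz => (List.pairwise_cons.mp hpair).1 z hz)
        (List.pairwise_cons.mp hpair).2
    have hA : (pyA_loop counts (PySem.List.sorted names (fun x => x) false) none none).2 = some x' := by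
      rw [hs]
      show (pyA_loop counts t (some (g h)) (some h)).2 = some x'
      rw [heq]
    -- facts about x' over names
    have hmemx' : x' ∈ names := by
      have : x' ∈ h :: t := by rcases hmem with rfl | hm; exacts [List.mem_cons_self, List.mem_cons_of_mem _ hm]
      rw [← hs] at this
      exact (PySem.List.mem_sorted names _ false x').mp this
    have hminx' : ∀ y ∈ names, m' ≤ g y := by
      intro y hy
      have hy2 : y ∈ h :: t := by
        rw [← hs]; exact (PySem.List.mem_sorted names _ false y).mpr hy
      rcases List.mem_cons.mp hy2 with rfl | hy'
      · exact hle'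
      · exact hmin y hy'
    have hnamex' : ∀ y ∈ names, g y = m' → x' ≤ y := by
      intro y hy hgy
      have : y ∈ h :: t := by
        rw [← hs]; exact (PySem.List.mem_sorted names _ false y).mpr hy
      rcases List.mem_cons.mp this with rfl | hy'
      · exact hname y (Or.inl rfl) hgy
      · exact hname y (Or.inr hy') hgy
    -- B side
    rcases hmv : PySem.List.min? (names.map g) (fun x => x) with _ | v
    · exact absurd (List.map_eq_nil_iff.mp ((PySem.List.min?_eq_none_iff _ _).mp hmv)) hnil
    · have hvmin : ∀ c ∈ names.map g, v ≤ c := PySem.List.min?_isMin hmv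
      have hvmem : v ∈ names.map g := PySem.List.min?_mem hmv
      obtain ⟨n, hn, hgn⟩ := List.mem_map.mp hvmem
      -- v = m'
      have hvm : v = m' := le_antisymm
        (hgx' ▸ hvmin (g x') (List.mem_map.mpr ⟨x', hmemx', rfl⟩))
        (hgn ▸ hminx' n hn)
      have hxf : x' ∈ names.filter (fun n => g n == v) :=
        List.mem_filter.mpr ⟨hmemx', by simp [hg, hgx', hvm]⟩
      rcases hmz : PySem.List.min? (names.filter (fun n => g n == v)) (fun x => x) with _ | z
      · exact absurd ((PySem.List.min?_eq_none_iff _ _).mp hmz) (List.ne_nil_of_mem hxf)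
      · have hzmem := PySem.List.min?_mem hmz
        have hzf := List.mem_filter.mp hzmem
        have hgz : g z = m' := hvm ▸ beq_iff_eq.mp hzf.2
        have h1 : x' ≤ z := hnamex' z hzf.1 hgz
        have h2 : z ≤ x' := PySem.List.min?_isMin hmz x' hxf
        rw [hA]
        show some x' = PySem.List.min? (names.filter (fun n => g n == v)) (fun x => x)
        rw [hmz]
        exact congrArg some (le_antisymm h1 h2)
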